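-- pv_equiv track=rewrite | github.com/tthuynh24/parishbulletin | Utils/BookletUtils - Copy.py | ordBookletPages
-- ===== SOURCE A (Python) =====
-- def ordBookletPages(numPages, firstPage, selLastPage):
--     lastPage = numPages if selLastPage <= 0 or selLastPage>numPages else selLastPage
--
--     numPages = 1 + lastPage - firstPage
--     numSheets = numPages // 4
--     if ((numPages > 4) & (numPages % 4 > 0)) | (numSheets == 0):
--         numSheets += 1
--
--     pagesToPrint = numSheets * 4
--     numBlankPages = pagesToPrint - numPages
--     frontOffset, backOffset = 0, 1
--
--     pagesInOrder = []
--     pagesInOrder.append(firstPage + pagesToPrint - 1)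
--     while len(pagesInOrder) < pagesToPrint:
--         pagesInOrder.append(firstPage + frontOffset)
--         pagesInOrder.append(firstPage + 1 + frontOffset)
--         frontOffset += 2
--         pagesInOrder.append(firstPage + pagesToPrint - 1 - backOffset)
--         pagesInOrder.append(firstPage + pagesToPrint - 1 - backOffset - 1)
--         backOffset += 2
--     del(pagesInOrder[len(pagesInOrder) - 1])
--
--     return pagesInOrder[:], firstPage, lastPage
-- ===== SOURCE B (Python) =====
-- def ordBookletPages(numPages, firstPage, selLastPage):
--     lastPage = numPages if selLastPage <= 0 or selLastPage > numPages else selLastPage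
--
--     numPages = 1 + lastPage - firstPage
--     numSheets = numPages // 4
--     if (numPages > 4 and numPages % 4 > 0) or numSheets == 0:
--         numSheets += 1
--
--     pagesToPrint = numSheets * 4
--     # closed-form imposition: the page at position j is determined directly from j
--     pagesInOrder = [firstPage + (pagesToPrint - 1 - j // 2 if (j // 2 + j) % 2 == 0 else j // 2)
--                     for j in range(pagesToPrint)]
--     return pagesInOrder, firstPage, lastPage
-- ===== Notes on version B (the rewrite author's own statement) =====
-- stated objective: simpler
-- what changed: Replaces A's while loop that seeds one element, appends four pages per iteration with mutable front/back offsets and deletes the trailing element, by a single closed-form list comprehension computing the page at each position directly from its index.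
import Mathlib
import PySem

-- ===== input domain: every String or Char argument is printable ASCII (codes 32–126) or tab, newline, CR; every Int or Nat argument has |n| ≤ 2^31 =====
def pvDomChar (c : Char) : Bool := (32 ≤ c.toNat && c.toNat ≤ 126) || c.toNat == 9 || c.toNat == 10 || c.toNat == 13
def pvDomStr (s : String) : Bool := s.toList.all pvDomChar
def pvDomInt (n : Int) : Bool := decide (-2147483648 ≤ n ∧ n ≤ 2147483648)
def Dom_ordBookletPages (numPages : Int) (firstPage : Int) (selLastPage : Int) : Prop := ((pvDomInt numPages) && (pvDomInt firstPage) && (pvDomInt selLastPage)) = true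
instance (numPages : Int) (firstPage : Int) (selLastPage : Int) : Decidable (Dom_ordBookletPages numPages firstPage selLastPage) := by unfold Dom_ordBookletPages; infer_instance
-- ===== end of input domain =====

-- B replaces A's append-four-then-delete while loop by a closed-form list comprehension
-- computing the page at each position directly from its index (objective: simpler).

-- ===== PORT A =====
-- the while loop of A: append four pages per iteration until the list is long enough
def ordBookletPagesLoop (f P frontOffset backOffset : Int) (pages : List Int) : List Int :=
  if (pages.length : Int) < P then
    ordBookletPagesLoop f P (frontOffset + 2) (backOffset + 2)
      (pages ++ [f + frontOffset, f + 1 + frontOffset, f + P - 1 - backOffset, f + P - 1 - backOffset - 1])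
  else pages
termination_by (P - pages.length).toNat
decreasing_by simp only [List.length_append, List.length_cons, List.length_nil]; omega

def ordBookletPages (numPages : Int) (firstPage : Int) (selLastPage : Int) : List Int × Int × Int :=
  let lastPage := if selLastPage ≤ 0 ∨ selLastPage > numPages then numPages else selLastPage
  let numPages2 := 1 + lastPage - firstPage
  let numSheets := PySem.Int.floordiv numPages2 4
  let numSheets2 := if (numPages2 > 4 ∧ PySem.Int.mod numPages2 4 > 0) ∨ numSheets = 0 then numSheets + 1 else numSheets
  let pagesToPrint := numSheets2 * 4
  let pagesInOrder := ordBookletPagesLoop firstPage pagesToPrint 0 1 [firstPage + pagesToPrint - 1]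
  (pagesInOrder.dropLast, firstPage, lastPage)

-- ===== PORT B =====
def ordBookletPages_alt (numPages : Int) (firstPage : Int) (selLastPage : Int) : List Int × Int × Int :=
  let lastPage := if selLastPage ≤ 0 ∨ selLastPage > numPages then numPages else selLastPage
  let numPages2 := 1 + lastPage - firstPage
  let numSheets := PySem.Int.floordiv numPages2 4
  let numSheets2 := if (numPages2 > 4 ∧ PySem.Int.mod numPages2 4 > 0) ∨ numSheets = 0 then numSheets + 1 else numSheets
  let pagesToPrint := numSheets2 * 4
  let pagesInOrder := (PySem.List.pyRange 0 pagesToPrint 1).map (fun j =>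
    firstPage + (if PySem.Int.mod (PySem.Int.floordiv j 2 + j) 2 = 0
                 then pagesToPrint - 1 - PySem.Int.floordiv j 2
                 else PySem.Int.floordiv j 2))
  (pagesInOrder, firstPage, lastPage)

-- ===== PRECONDITION & SPEC =====
def Spec_ordBookletPages (numPages : Int) (firstPage : Int) (selLastPage : Int) (out : List Int × Int × Int) : Prop := out = ordBookletPages_alt numPages firstPage selLastPage
instance (numPages : Int) (firstPage : Int) (selLastPage : Int) (out : List Int × Int × Int) : Decidable (Spec_ordBookletPages numPages firstPage selLastPage out) := by unfold Spec_ordBookletPages; infer_instance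

-- ===== CLAIM (what is proved, stated in full; the proofs are below) =====
def Claim_equal_ordBookletPages : Prop := ∀ (numPages : Int) (firstPage : Int) (selLastPage : Int), Dom_ordBookletPages numPages firstPage selLastPage → Spec_ordBookletPages numPages firstPage selLastPage (ordBookletPages numPages firstPage selLastPage)

-- ===== LEMMAS AND PROOFS =====

-- the quadruple A's loop appends at iteration i
def pvQuad (f P : Int) (i : Nat) : List Int := [f + 2*i, f + 2*i + 1, f + P - 2 - 2*i, f + P - 3 - 2*i]

-- the four consecutive entries of B's list starting at position 4*s
def pvG (f P : Int) (s : Nat) : List Int := [f + P - 1 - 2*s, f + 2*s, f + 2*s + 1, f + P - 2 - 2*s]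

-- B's per-index formula
def pvB (f P : Int) (j : Int) : Int :=
  f + (if PySem.Int.mod (PySem.Int.floordiv j 2 + j) 2 = 0
       then P - 1 - PySem.Int.floordiv j 2
       else PySem.Int.floordiv j 2)

lemma pv_loop_inv (f P : Int) (k : Nat) (hP : P = 4 * k) :
    ∀ (j i : Nat), i + j = k → ∀ (fo bo : Int), fo = 2 * (i : Int) → bo = 2 * (i : Int) + 1 →
    ∀ acc : List Int, (acc.length : Int) = 1 + 4 * i →
    ordBookletPagesLoop f P fo bo acc = acc ++ (List.range j).flatMap (fun t => pvQuad f P (i + t)) := by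
  intro j
  induction j with
  | zero =>
    intro i hik fo bo hfo hbo acc hacc
    rw [ordBookletPagesLoop, if_neg (by omega)]
    simp
  | succ j ih =>
    intro i hik fo bo hfo hbo acc hacc
    rw [ordBookletPagesLoop, if_pos (by omega)]
    have hstep : acc ++ [f + fo, f + 1 + fo, f + P - 1 - bo, f + P - 1 - bo - 1]
        = acc ++ pvQuad f P i := by
      simp only [pvQuad, List.append_cancel_left_eq]
      subst hfo hbo
      norm_num; omega
    rw [hstep]
    rw [ih (i + 1) (by omega) (fo + 2) (bo + 2) (by push_cast; omega) (by push_cast; omega)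
        (acc ++ pvQuad f P i) (by simp [pvQuad]; omega)]
    rw [List.range_succ_eq_map]
    simp only [List.flatMap_cons, List.flatMap_map, Nat.add_zero, List.append_assoc]
    have hfun : (fun a => pvQuad f P (i + a.succ)) = (fun t => pvQuad f P (i + 1 + t)) := by
      funext t; congr 1; omega
    rw [hfun]

lemma pv_halve {α : Type} (g : Nat → List α) :
    ∀ m : Nat, (List.range (2 * m)).flatMap g
      = (List.range m).flatMap (fun t => g (2 * t) ++ g (2 * t + 1)) := by
  intro m
  induction m with
  | zero => simp
  | succ m ih =>
    have h2 : 2 * (m + 1) = (2 * m + 1) + 1 := by omega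
    rw [h2, List.range_succ, List.range_succ, List.range_succ,
        List.flatMap_append, List.flatMap_append, ih]
    simp

lemma pv_floordiv_natCast' (n : Nat) : PySem.Int.floordiv ((n : Nat) : Int) 2 = ((n / 2 : Nat) : Int) := by
  exact_mod_cast PySem.Int.floordiv_natCast n 2

lemma pv_mod_natCast' (n : Nat) : PySem.Int.mod ((n : Nat) : Int) 2 = ((n % 2 : Nat) : Int) := by
  exact_mod_cast PySem.Int.mod_natCast n 2

lemma pvB_eval (f P : Int) (n : Nat) :
    pvB f P (n : Int) = f + (if n % 2 = (n / 2) % 2 then P - 1 - (n / 2 : Nat) else ((n / 2 : Nat) : Int)) := by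
  unfold pvB
  rw [pv_floordiv_natCast']
  have : ((n / 2 : Nat) : Int) + (n : Int) = ((n / 2 + n : Nat) : Int) := by push_cast; ring
  rw [this, pv_mod_natCast']
  rcases Nat.even_or_odd n with h | h <;>
  · rcases Nat.even_or_odd (n / 2) with h2 | h2 <;>
    · simp only [Nat.even_iff, Nat.odd_iff] at h h2
      have hm : (n / 2 + n) % 2 = (n / 2 % 2 + n % 2) % 2 := by omega
      rw [hm, h, h2]
      norm_num

lemma pvG_eval (f P : Int) (s : Nat) :
    [pvB f P ((2 * (2 * s) : Nat) : Int)] ++ [pvB f P ((2 * (2 * s) + 1 : Nat) : Int)]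
      ++ ([pvB f P ((2 * (2 * s + 1) : Nat) : Int)] ++ [pvB f P ((2 * (2 * s + 1) + 1 : Nat) : Int)])
      = pvG f P s := by
  rw [pvB_eval, pvB_eval, pvB_eval, pvB_eval]
  have e1 : (2 * (2 * s)) / 2 = 2 * s := by omega
  have e2 : (2 * (2 * s) + 1) / 2 = 2 * s := by omega
  have e3 : (2 * (2 * s + 1)) / 2 = 2 * s + 1 := by omega
  have e4 : (2 * (2 * s + 1) + 1) / 2 = 2 * s + 1 := by omega
  rw [e1, e2, e3, e4]
  have m1 : (2 * (2 * s)) % 2 = 0 := by omega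
  have m2 : (2 * (2 * s) + 1) % 2 = 1 := by omega
  have m3 : (2 * (2 * s + 1)) % 2 = 0 := by omega
  have m4 : (2 * (2 * s + 1) + 1) % 2 = 1 := by omega
  have p1 : (2 * s) % 2 = 0 := by omega
  have p2 : (2 * s + 1) % 2 = 1 := by omega
  rw [m1, m2, m3, m4, p1, p2]
  simp only [pvG, List.cons_append, List.nil_append, List.cons.injEq, and_true]
  norm_num
  omega

lemma pv_map_eq_flatMap {α β : Type} (g : α → β) (l : List α) :
    l.map g = l.flatMap (fun x => [g x]) := by
  induction l with
  | nil => rfl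
  | cons a l ih => simp [ih]

lemma pv_rot (f P : Int) :
    ∀ (m s : Nat), (List.range m).flatMap (fun t => pvG f P (s + t)) ++ [f + P - 1 - 2 * ((s + m : Nat) : Int)]
      = (f + P - 1 - 2 * (s : Int)) :: (List.range m).flatMap (fun t => pvQuad f P (s + t)) := by
  intro m
  induction m with
  | zero => simp
  | succ m ih =>
    intro s
    rw [List.range_succ_eq_map]
    simp only [List.flatMap_cons, List.flatMap_map, Nat.add_zero, List.append_assoc]
    have hsh : (fun t => pvG f P (s + (t + 1))) = (fun t => pvG f P ((s + 1) + t)) := by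
      funext t; congr 1; omega
    have hsh2 : (fun t => pvQuad f P (s + (t + 1))) = (fun t => pvQuad f P ((s + 1) + t)) := by
      funext t; congr 1; omega
    have hm : ((s + (m + 1) : Nat) : Int) = (((s + 1) + m : Nat) : Int) := by push_cast; ring
    rw [hm, hsh]
    rw [ih (s + 1)]
    have hGA : pvG f P s ++ ((f + P - 1 - 2 * ((s + 1 : Nat) : Int)) :: (List.range m).flatMap (fun t => pvQuad f P ((s + 1) + t)))
        = (f + P - 1 - 2 * (s : Int)) :: (pvQuad f P s ++ (List.range m).flatMap (fun t => pvQuad f P ((s + 1) + t))) := by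
      simp only [pvG, pvQuad, List.cons_append, List.nil_append, List.cons.injEq, and_true]
      push_cast
      simp only [true_and]
      ring
    rw [hGA, hsh2]

lemma pv_pages_eq (f : Int) (ns : Int) :
    (ordBookletPagesLoop f (ns * 4) 0 1 [f + ns * 4 - 1]).dropLast
      = (PySem.List.pyRange 0 (ns * 4) 1).map (fun j =>
          f + (if PySem.Int.mod (PySem.Int.floordiv j 2 + j) 2 = 0
               then ns * 4 - 1 - PySem.Int.floordiv j 2
               else PySem.Int.floordiv j 2)) := by
  by_cases hns : ns ≤ 0
  · by_cases hz : ns = 0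
    · -- ns = 0 : loop stops at once, range is empty
      rw [hz]
      rw [ordBookletPagesLoop, if_neg (by norm_num)]
      rw [PySem.List.pyRange_one_eq_nil (by norm_num)]
      simp
    · rw [ordBookletPagesLoop, if_neg (by simp; omega)]
      rw [PySem.List.pyRange_one_eq_nil (by omega)]
      simp
  · -- ns ≥ 1 : P = 4 * k with k = ns.toNat
    have hns' : 0 < ns := by omega
    set P := ns * 4 with hPdef
    obtain ⟨k, hk⟩ : ∃ k : Nat, P = 4 * (k : Int) := ⟨ns.toNat, by omega⟩  -- k = ns.toNat
    have hloop := pv_loop_inv f P k hk k 0 (by omega) 0 1 (by norm_num) (by norm_num)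
      [f + P - 1] (by simp)
    simp only [Nat.zero_add] at hloop
    -- rewrite B's side into flatMap of pvG blocks
    have hB : (PySem.List.pyRange 0 P 1).map (fun j => pvB f P j)
        = (List.range k).flatMap (fun s => pvG f P s) := by
      rw [PySem.List.pyRange_one]
      have hPn : (P - 0).toNat = 2 * (2 * k) := by omega
      rw [hPn, List.map_map]
      have h0 : ((fun j => pvB f P j) ∘ fun n : Nat => 0 + (n : Int)) = (fun n : Nat => pvB f P (n : Int)) := by
        funext n; simp [Function.comp]
      rw [h0, pv_map_eq_flatMap, pv_halve, pv_halve]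
      congr 1
      funext s
      exact pvG_eval f P s
    have hrot := pv_rot f P k 0
    simp only [Nat.zero_add, Nat.cast_zero, mul_zero, sub_zero] at hrot
    -- assemble: loop output = B's list ++ [last element]; dropLast removes it
    have hassemble : ordBookletPagesLoop f P 0 1 [f + P - 1]
        = ((PySem.List.pyRange 0 P 1).map (fun j => pvB f P j)) ++ [f + P - 1 - 2 * ((k : Nat) : Int)] := by
      rw [hloop, hB, hrot]
      simp
    rw [hassemble, List.dropLast_concat]
    rfl

-- ===== VERDICT (by name: the statement is the Claim_ definition above) =====
theorem ordBookletPages_spec : Claim_equal_ordBookletPages := by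
  intro numPages firstPage selLastPage _
  unfold Spec_ordBookletPages ordBookletPages ordBookletPages_alt
  simp only []
  refine congrArg (fun l => (l, firstPage, _)) ?_
  exact pv_pages_eq firstPage _
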